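-- pv_equiv track=rewrite | github.com/woofer300/gamepigeon-anagrams-bot | anagrams_solver.py | calculate_max_points
-- ===== SOURCE A (Python) =====
-- def calculate_max_points(word_list):
--     max_score = 0
--     for word in word_list:
--         if len(word) == 7:
--             max_score += 3000
--         elif len(word) == 6:
--             max_score += 2000
--         elif len(word) == 5:
--             max_score += 1200
--         elif len(word) == 4:
--             max_score += 400
--         elif len(word) == 3:
--             max_score += 100
--     return max_score
-- ===== SOURCE B (Python) =====
-- SCORES = {7: 3000, 6: 2000, 5: 1200, 4: 400, 3: 100}
--
-- def calculate_max_points(word_list):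
--     # Phase 1: frequency table of word lengths
--     counts = {}
--     for w in word_list:
--         l = len(w)
--         counts[l] = counts.get(l, 0) + 1
--     # Phase 2: dot-product of the score table with the length frequencies
--     return sum(SCORES.get(l, 0) * c for l, c in counts.items())
-- ===== Notes on version B (the rewrite author's own statement) =====
-- stated objective: alternative
-- what changed: A's single scan with an if-elif accumulation is replaced by a two-phase tabulate-then-combine: first build a frequency table of word lengths, then take the dot product of a score table with the distinct-length counts.
import Mathlib
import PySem

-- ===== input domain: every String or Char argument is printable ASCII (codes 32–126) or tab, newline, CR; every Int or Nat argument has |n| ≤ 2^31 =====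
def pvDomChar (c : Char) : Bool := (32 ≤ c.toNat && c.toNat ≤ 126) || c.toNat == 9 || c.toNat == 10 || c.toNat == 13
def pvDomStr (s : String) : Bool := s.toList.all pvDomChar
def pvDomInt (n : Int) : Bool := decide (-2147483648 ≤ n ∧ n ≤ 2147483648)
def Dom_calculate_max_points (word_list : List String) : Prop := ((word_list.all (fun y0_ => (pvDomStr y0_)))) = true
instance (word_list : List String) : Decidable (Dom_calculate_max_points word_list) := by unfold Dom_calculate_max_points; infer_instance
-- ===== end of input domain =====

-- B replaces A's single if-elif scan by a two-phase tabulate-then-combine (length frequency table, then a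
-- dot product with a score table); objective: alternative decomposition, same cost.

-- ===== PORT A =====
def calculate_max_points (word_list : List String) : Int :=
  word_list.foldl (fun max_score word =>
    if PySem.Str.len word = 7 then max_score + 3000
    else if PySem.Str.len word = 6 then max_score + 2000
    else if PySem.Str.len word = 5 then max_score + 1200
    else if PySem.Str.len word = 4 then max_score + 400
    else if PySem.Str.len word = 3 then max_score + 100
    else max_score) 0

-- ===== PORT B =====
def pvScores : PySem.Dict Int Int :=
  PySem.Dict.ofList [(7, 3000), (6, 2000), (5, 1200), (4, 400), (3, 100)]

def calculate_max_points_alt (word_list : List String) : Int :=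
  let counts := word_list.foldl
    (fun d w => d.insert (PySem.Str.len w) (d.getD (PySem.Str.len w) 0 + 1))
    PySem.Dict.empty
  (counts.items.map (fun p => pvScores.getD p.1 0 * p.2)).sum

-- ===== PRECONDITION & SPEC =====
def Spec_calculate_max_points (word_list : List String) (out : Int) : Prop := out = calculate_max_points_alt word_list
instance (word_list : List String) (out : Int) : Decidable (Spec_calculate_max_points word_list out) := by unfold Spec_calculate_max_points; infer_instance

-- ===== CLAIM (what is proved, stated in full; the proofs are below) =====
def Claim_equal_calculate_max_points : Prop := ∀ (word_list : List String), Dom_calculate_max_points word_list → Spec_calculate_max_points word_list (calculate_max_points word_list)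

-- ===== LEMMAS AND PROOFS =====

-- the per-length score A's if-elif chain awards equals a lookup in B's score table
lemma score_eq_getD (l : Int) :
    (if l = 7 then (3000 : Int) else if l = 6 then 2000 else if l = 5 then 1200
     else if l = 4 then 400 else if l = 3 then 100 else 0) = pvScores.getD l 0 := by
  have h : pvScores = PySem.Dict.mk [(7, 3000), (6, 2000), (5, 1200), (4, 400), (3, 100)] := by rfl
  rw [h]
  simp only [PySem.Dict.getD_eq_get?_getD, PySem.Dict.get?_mk_cons]
  split_ifs <;> (simp_all; try rfl)

-- A's accumulating scan, with the init generalised, is the sum of the per-word scores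
lemma A_foldl_eq (ws : List String) (init : Int) :
    ws.foldl (fun max_score word =>
      if PySem.Str.len word = 7 then max_score + 3000
      else if PySem.Str.len word = 6 then max_score + 2000
      else if PySem.Str.len word = 5 then max_score + 1200
      else if PySem.Str.len word = 4 then max_score + 400
      else if PySem.Str.len word = 3 then max_score + 100
      else max_score) init
    = init + (ws.map (fun w => pvScores.getD (PySem.Str.len w) 0)).sum := by
  induction ws generalizing init with
  | nil => simp
  | cons w ws ih =>
    simp only [List.foldl_cons, List.map_cons, List.sum_cons, ih]
    rw [← score_eq_getD (PySem.Str.len w)]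
    split_ifs <;> ring

-- sum of f over the distinct values, weighted by multiplicity, = sum of f over the whole list
lemma sum_over_distinct (L : List Int) (f : Int → Int) :
    ((PySem.Set.ofList L).map (fun k => f k * (L.count k : Int))).sum = (L.map f).sum := by
  rw [← List.sum_toFinset _ (PySem.Set.nodup_ofList L), Finset.sum_list_map_count]
  have h : (PySem.Set.ofList L).toFinset = L.toFinset := by
    ext x; simp [PySem.Set.mem_ofList]
  rw [h]
  refine Finset.sum_congr rfl (fun x _ => ?_)
  simp [mul_comm]

-- ===== VERDICT (by name: the statement is the Claim_ definition above) =====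
theorem calculate_max_points_spec : Claim_equal_calculate_max_points := by
  intro word_list _
  show calculate_max_points word_list = calculate_max_points_alt word_list
  unfold calculate_max_points calculate_max_points_alt
  rw [A_foldl_eq, zero_add]
  have hfold : word_list.foldl
      (fun d w => d.insert (PySem.Str.len w) (d.getD (PySem.Str.len w) 0 + 1))
      PySem.Dict.empty
      = PySem.Dict.counter (word_list.map PySem.Str.len) := by
    rw [← PySem.Dict.foldl_insert_getD_add_one_eq_counter, List.foldl_map]
  simp only [hfold, PySem.Dict.items_counter, List.map_map, Function.comp_def]
  rw [sum_over_distinct (word_list.map PySem.Str.len) (fun k => pvScores.getD k 0)]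
  simp [List.map_map, Function.comp_def]
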